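-- pv_equiv track=rewrite | github.com/DNYoussef/familiar-gm-assistant | .sandboxes/phase2-config-test/analyzer/dup_detection/mece_analyzer.py | _normalize_code
-- ===== SOURCE A (Python) =====
-- def _normalize_code(code: str) -> str:
--     """Normalize code for similarity comparison."""
--     # Remove comments and docstrings
--     lines = []
--     for line in code.split("\n"):
--         line = line.strip()
--         if line and not line.startswith("#"):
--             # Remove inline comments
--             if "#" in line:
--                 line = line.split("#")[0].strip()
--             if line:
--                 lines.append(line)
--
--     # Join and normalize whitespace
--     normalized = " ".join(lines)
--     normalized = " ".join(normalized.split())  # Normalize whitespace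
--
--     return normalized
-- ===== SOURCE B (Python) =====
-- import re
--
-- def _normalize_code(code: str) -> str:
--     """Normalize code for similarity comparison."""
--     return " ".join(re.sub(r"#.*", "", code).split())
-- ===== Notes on version B (the rewrite author's own statement) =====
-- stated objective: idiomatic
-- what changed: Replaces the per-line loop with strip/startswith/split('#') guards by a single regex substitution removing '#' comments over the whole string followed by one split/join whitespace collapse.
import Mathlib
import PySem

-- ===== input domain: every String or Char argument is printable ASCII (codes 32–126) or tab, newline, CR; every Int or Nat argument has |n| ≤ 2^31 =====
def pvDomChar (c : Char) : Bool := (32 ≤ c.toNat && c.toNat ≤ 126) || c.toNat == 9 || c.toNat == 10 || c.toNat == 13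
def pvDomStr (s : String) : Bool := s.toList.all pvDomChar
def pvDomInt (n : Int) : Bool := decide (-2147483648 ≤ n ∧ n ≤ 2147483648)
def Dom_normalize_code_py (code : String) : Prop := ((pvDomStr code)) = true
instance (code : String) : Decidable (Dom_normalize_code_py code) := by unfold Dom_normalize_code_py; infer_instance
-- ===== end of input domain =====

-- B replaces A's per-line strip/startswith/split('#') loop by one comment-stripping pass
-- (the regex sub r'#.*', ported by hand as stripHash) followed by a single whitespace
-- split/join (objective: idiomatic).


-- ===== PORT A =====
-- the body of A's 'for line in code.split("\n")' loop, as a fold step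
-- (Python's 'line.split("#")[0]' is '.headD ""': str.split always returns a nonempty list,
--  so the [0] indexing cannot raise)
def aLineStep (acc : List String) (line : String) : List String :=
  let l := PySem.Str.strip line
  if l ≠ "" ∧ PySem.Str.startswith l "#" = false then
    let l2 := if PySem.Str.isIn "#" l then
        PySem.Str.strip (((PySem.Str.split? l "#").getD []).headD "") else l
    if l2 ≠ "" then acc ++ [l2] else acc
  else acc

def normalize_code_py (code : String) : String :=
  let lines := ((PySem.Str.split? code "\n").getD []).foldl aLineStep []
  let normalized := PySem.Str.join " " lines
  PySem.Str.join " " (PySem.Str.split₀ normalized)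

-- ===== PORT B =====
-- hand port of Source B's re.sub(r"#.*", "", code) with default flags ('.' stops at a newline):
-- from each '#' on, drop characters up to the next newline; exact on every input
def stripHash : List Char → List Char
  | [] => []
  | c :: rest =>
    if c = '#' then stripHash (rest.dropWhile (· ≠ '\n'))
    else c :: stripHash rest
termination_by l => l.length
decreasing_by
  · simpa using Nat.lt_succ_of_le (List.length_dropWhile_le _ rest)
  · simp

def normalize_code_py_alt (code : String) : String :=
  PySem.Str.join " " (PySem.Str.split₀ (String.ofList (stripHash code.toList)))

-- ===== PRECONDITION & SPEC =====
def Spec_normalize_code_py (code : String) (out : String) : Prop := out = normalize_code_py_alt code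
instance (code : String) (out : String) : Decidable (Spec_normalize_code_py code out) := by unfold Spec_normalize_code_py; infer_instance

-- ===== CLAIM (what is proved, stated in full; the proofs are below) =====
def Claim_equal_normalize_code_py : Prop := ∀ (code : String), Dom_normalize_code_py code → Spec_normalize_code_py code (normalize_code_py code)

-- ===== LEMMAS AND PROOFS =====

def splitSep (sep : Char) : List Char → List (List Char)
  | [] => [[]]
  | c :: rest =>
    if c = sep then [] :: splitSep sep rest
    else match splitSep sep rest with
      | [] => [[c]]
      | h :: t => (c :: h) :: t

theorem splitSep_ne_nil (sep : Char) (cs : List Char) : splitSep sep cs ≠ [] := by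
  cases cs with
  | nil => simp [splitSep]
  | cons c rest =>
    simp only [splitSep]
    split
    · simp
    · split <;> simp

theorem splitSep_go (sep : Char) (fuel : Nat) :
    ∀ (cs cur acc : _), cs.length < fuel →
    PySem.Chars.splitOn.go [sep] fuel cs cur acc =
      acc.reverse ++ (match splitSep sep cs with
        | [] => []
        | h :: t => (cur.reverse ++ h) :: t) := by
  induction fuel with
  | zero => intro cs cur acc h; omega
  | succ n ih =>
    intro cs cur acc h
    cases cs with
    | nil => simp [PySem.Chars.splitOn.go, splitSep]
    | cons c rest =>
      by_cases hc : c = sep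
      · subst hc
        have hpre : [c].isPrefixOf (c :: rest) = true := by simp [List.isPrefixOf]
        rw [PySem.Chars.splitOn.go]
        simp only [hpre, if_true, List.length_cons, List.drop_succ_cons, List.length_nil, List.drop_zero]
        rw [ih rest [] (cur.reverse :: acc) (by simp at h; omega)]
        rcases hs : splitSep c rest with _ | ⟨hd, tl⟩
        · exact absurd hs (splitSep_ne_nil c rest)
        · simp [splitSep, hs]
      · have hpre : [sep].isPrefixOf (c :: rest) = false := by
          simp [List.isPrefixOf]; exact fun hh => absurd hh.symm hc
        rw [PySem.Chars.splitOn.go]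
        simp only [hpre, Bool.false_eq_true, if_false]
        rw [ih rest (c :: cur) acc (by simp at h; omega)]
        rcases hs : splitSep sep rest with _ | ⟨hd, tl⟩
        · exact absurd hs (splitSep_ne_nil sep rest)
        · simp [splitSep, hc, hs]

theorem splitOn_singleton (sep : Char) (cs : List Char) :
    PySem.Chars.splitOn cs [sep] = splitSep sep cs := by
  unfold PySem.Chars.splitOn
  rw [splitSep_go sep (cs.length + 1) cs [] [] (by omega)]
  rcases h : splitSep sep cs with _ | ⟨hd, tl⟩
  · exact absurd h (splitSep_ne_nil sep cs)
  · simp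

theorem splitSep_structure (sep : Char) (cs : List Char) :
    splitSep sep cs = cs.takeWhile (· ≠ sep) ::
      (match cs.dropWhile (· ≠ sep) with
        | [] => []
        | _ :: r => splitSep sep r) := by
  induction cs with
  | nil => simp [splitSep]
  | cons c rest ih =>
    by_cases hc : c = sep
    · subst hc; simp [splitSep, List.takeWhile, List.dropWhile]
    · simp only [splitSep, hc, if_false]
      rw [ih]
      simp [List.takeWhile, List.dropWhile, hc]

theorem split₀_go_acc (cs cur acc) :
    PySem.Chars.split₀.go cs cur acc = acc.reverse ++ PySem.Chars.split₀.go cs cur [] := by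
  induction cs generalizing cur acc with
  | nil => simp [PySem.Chars.split₀.go]; split <;> simp
  | cons c rest ih =>
    by_cases hc : PySem.Chars.isspace c = true
    · by_cases hcur : cur.isEmpty = true
      · simp only [PySem.Chars.split₀.go, hc, if_true, hcur]
        exact ih [] acc
      · simp only [PySem.Chars.split₀.go, hc, if_true, hcur, Bool.false_eq_true, if_false]
        rw [ih [] (cur.reverse :: acc), ih [] [cur.reverse]]
        simp
    · simp only [PySem.Chars.split₀.go, hc, Bool.false_eq_true, if_false]
      exact ih (c :: cur) acc

theorem split₀_go_append_ws {c : Char} (hc : PySem.Chars.isspace c = true) (ys xs cur acc) :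
    PySem.Chars.split₀.go (xs ++ c :: ys) cur acc =
      acc.reverse ++ PySem.Chars.split₀.go xs cur [] ++ PySem.Chars.split₀.go ys [] [] := by
  induction xs generalizing cur acc with
  | nil =>
    by_cases hcur : cur.isEmpty = true
    · simp only [List.nil_append, PySem.Chars.split₀.go, hc, if_true, hcur]
      rw [split₀_go_acc ys [] acc]
      simp
    · simp only [List.nil_append, PySem.Chars.split₀.go, hc, if_true, hcur, Bool.false_eq_true,
        if_false]
      rw [split₀_go_acc ys [] (cur.reverse :: acc)]
      simp
  | cons x xs ih =>
    by_cases hx : PySem.Chars.isspace x = true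
    · by_cases hcur : cur.isEmpty = true
      · simp only [List.cons_append, PySem.Chars.split₀.go, hx, if_true, hcur]
        exact ih [] acc
      · simp only [List.cons_append, PySem.Chars.split₀.go, hx, if_true, hcur, Bool.false_eq_true,
          if_false]
        rw [ih [] (cur.reverse :: acc), split₀_go_acc xs [] [cur.reverse]]
        simp
    · simp only [List.cons_append, PySem.Chars.split₀.go, hx, Bool.false_eq_true, if_false]
      exact ih (x :: cur) acc

theorem split₀_append_ws {c : Char} (hc : PySem.Chars.isspace c = true) (xs ys) :
    PySem.Chars.split₀ (xs ++ c :: ys) = PySem.Chars.split₀ xs ++ PySem.Chars.split₀ ys := by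
  unfold PySem.Chars.split₀
  rw [split₀_go_append_ws hc ys xs [] []]
  simp

theorem split₀_cons_ws {c : Char} (hc : PySem.Chars.isspace c = true) (ys) :
    PySem.Chars.split₀ (c :: ys) = PySem.Chars.split₀ ys := by
  have := split₀_append_ws hc [] ys
  simpa [PySem.Chars.split₀, PySem.Chars.split₀.go] using this

theorem split₀_all_ws {t : List Char} (h : ∀ c ∈ t, PySem.Chars.isspace c = true) :
    PySem.Chars.split₀ t = [] := by
  induction t with
  | nil => rfl
  | cons c rest ih =>
    rw [split₀_cons_ws (h c (by simp)) rest]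
    exact ih fun x hx => h x (by simp [hx])

theorem split₀_ws_prefix {a : List Char} (h : ∀ c ∈ a, PySem.Chars.isspace c = true) (b) :
    PySem.Chars.split₀ (a ++ b) = PySem.Chars.split₀ b := by
  induction a with
  | nil => simp
  | cons c rest ih =>
    rw [List.cons_append, split₀_cons_ws (h c (by simp))]
    exact ih fun x hx => h x (by simp [hx])

theorem split₀_ws_suffix {t : List Char} (h : ∀ c ∈ t, PySem.Chars.isspace c = true) (l) :
    PySem.Chars.split₀ (l ++ t) = PySem.Chars.split₀ l := by
  cases t with
  | nil => simp
  | cons c rest =>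
    rw [split₀_append_ws (h c (by simp)) l rest,
      split₀_all_ws (t := rest) (fun x hx => h x (by simp [hx]))]
    simp

theorem split₀_join_ws {sep : Char} (hc : PySem.Chars.isspace sep = true) (parts) :
    PySem.Chars.split₀ (PySem.Chars.join [sep] parts) =
      (parts.map PySem.Chars.split₀).flatten := by
  induction parts with
  | nil => simp [PySem.Chars.join_nil]; rfl
  | cons p rest ih =>
    cases rest with
    | nil => simp [PySem.Chars.join_singleton]
    | cons q t =>
      rw [PySem.Chars.join_cons_cons]
      have : p ++ [sep] ++ PySem.Chars.join [sep] (q :: t)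
          = p ++ sep :: PySem.Chars.join [sep] (q :: t) := by simp
      rw [this, split₀_append_ws hc, ih]
      simp

theorem split₀_lstrip (l) : PySem.Chars.split₀ (PySem.Chars.lstrip l) = PySem.Chars.split₀ l := by
  induction l with
  | nil => rfl
  | cons c rest ih =>
    by_cases hc : PySem.Chars.isspace c = true
    · rw [split₀_cons_ws hc]
      rw [← ih]
      simp [PySem.Chars.lstrip, List.dropWhile, hc]
    · simp [PySem.Chars.lstrip, List.dropWhile, hc]

theorem rstrip_decomp (l : List Char) :
    l = PySem.Chars.rstrip l ++ (List.takeWhile PySem.Chars.isspace l.reverse).reverse ∧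
    (∀ c ∈ (List.takeWhile PySem.Chars.isspace l.reverse).reverse, PySem.Chars.isspace c = true) := by
  constructor
  · have h0 := congrArg List.reverse (List.takeWhile_append_dropWhile
      (p := PySem.Chars.isspace) (l := l.reverse))
    simp only [List.reverse_append, List.reverse_reverse] at h0
    exact h0.symm
  · intro c hc
    exact List.mem_takeWhile_imp (by simpa using hc)

theorem split₀_rstrip (l) : PySem.Chars.split₀ (PySem.Chars.rstrip l) = PySem.Chars.split₀ l := by
  obtain ⟨hdec, hws⟩ := rstrip_decomp l
  conv_rhs => rw [hdec]
  rw [split₀_ws_suffix hws]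

theorem split₀_strip (l) : PySem.Chars.split₀ (PySem.Chars.strip l) = PySem.Chars.split₀ l := by
  rw [PySem.Chars.strip, split₀_rstrip, split₀_lstrip]

theorem all_ws_of_strip_eq_nil {l : List Char} (h : PySem.Chars.strip l = []) :
    ∀ c ∈ l, PySem.Chars.isspace c = true := by
  have h2 : PySem.Chars.lstrip l = [] ∨ ∀ c ∈ PySem.Chars.lstrip l, PySem.Chars.isspace c = true := by
    unfold PySem.Chars.strip PySem.Chars.rstrip at h
    right
    intro c hc
    have : List.dropWhile PySem.Chars.isspace (PySem.Chars.lstrip l).reverse = [] := by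
      simpa using congrArg List.reverse h
    rw [List.dropWhile_eq_nil_iff] at this
    exact this c (by simpa using hc)
  intro c hc
  -- l = takeWhile isspace l ++ lstrip l
  have hdec : l = List.takeWhile PySem.Chars.isspace l ++ PySem.Chars.lstrip l := by
    simp [PySem.Chars.lstrip]
  rw [hdec] at hc
  rcases List.mem_append.mp hc with h1 | h1
  · exact List.mem_takeWhile_imp h1
  · rcases h2 with h2 | h2
    · rw [h2] at h1; simp at h1
    · exact h2 c h1

theorem strip_decomp (l : List Char) :
    ∃ a b, l = a ++ PySem.Chars.strip l ++ b ∧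
      (∀ c ∈ a, PySem.Chars.isspace c = true) ∧ (∀ c ∈ b, PySem.Chars.isspace c = true) := by
  refine ⟨List.takeWhile PySem.Chars.isspace l,
    (List.takeWhile PySem.Chars.isspace (PySem.Chars.lstrip l).reverse).reverse, ?_, ?_, ?_⟩
  · have h1 : l = List.takeWhile PySem.Chars.isspace l ++ PySem.Chars.lstrip l := by
      simp [PySem.Chars.lstrip]
    obtain ⟨hdec, _⟩ := rstrip_decomp (PySem.Chars.lstrip l)
    rw [PySem.Chars.strip]
    conv_rhs => rw [List.append_assoc, ← hdec]
    exact h1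
  · intro c hc; exact List.mem_takeWhile_imp hc
  · exact (rstrip_decomp (PySem.Chars.lstrip l)).2

theorem stripHash_eq_join (cs : List Char) :
    stripHash cs = PySem.Chars.join ['\n']
      ((splitSep '\n' cs).map (List.takeWhile (· ≠ '#'))) := by
  induction cs using stripHash.induct with
  | case1 => simp [stripHash, splitSep, PySem.Chars.join_singleton]
  | case2 rest ih =>
    rw [stripHash, if_pos rfl, ih]
    have hstr := splitSep_structure '\n' rest
    rcases hd : List.dropWhile (fun x => decide (x ≠ '\n')) rest with _ | ⟨d, r⟩
    · rw [hd] at hstr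
      simp [splitSep, hstr, PySem.Chars.join_singleton, List.takeWhile]
    · have hdn : d = '\n' := by
        have h2 := List.head?_dropWhile_not (p := (fun x => decide (x ≠ '\n'))) (l := rest)
        rw [hd] at h2
        simpa using h2
      subst hdn
      rw [hd] at hstr
      rcases hs : splitSep '\n' r with _ | ⟨h, t⟩
      · exact absurd hs (splitSep_ne_nil _ _)
      · simp [splitSep, hstr, hs, List.takeWhile, PySem.Chars.join_cons_cons]
  | case3 c rest hc ih =>
    rw [stripHash, if_neg hc, ih]
    by_cases hcn : c = '\n'
    · subst hcn
      rcases hs : splitSep '\n' rest with _ | ⟨h, t⟩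
      · exact absurd hs (splitSep_ne_nil _ _)
      · simp [splitSep, hs, PySem.Chars.join_cons_cons]
    · rcases hs : splitSep '\n' rest with _ | ⟨h, t⟩
      · exact absurd hs (splitSep_ne_nil _ _)
      · cases t with
        | nil => simp [splitSep, hs, hcn, hc, PySem.Chars.join_singleton]
        | cons q t' =>
          simp [splitSep, hs, hcn, hc, PySem.Chars.join_cons_cons]

theorem ws_ne_hash {c : Char} (h : PySem.Chars.isspace c = true) : c ≠ '#' := by
  rintro rfl; revert h; decide

theorem takeWhile_hash_append {s : List Char} (h : '#' ∈ s) (b) :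
    List.takeWhile (fun x => decide (x ≠ '#')) (s ++ b)
      = List.takeWhile (fun x => decide (x ≠ '#')) s := by
  induction s with
  | nil => simp at h
  | cons c rest ih =>
    by_cases hc : c = '#'
    · subst hc; simp
    · have h1 : '#' ∈ rest := by
        rcases List.mem_cons.mp h with h1 | h1
        · exact absurd h1.symm hc
        · exact h1
      rw [List.cons_append, List.takeWhile_cons, List.takeWhile_cons, ih h1]

theorem headD_splitOn_hash (s : List Char) :
    (PySem.Chars.splitOn s ['#']).headD [] = List.takeWhile (fun x => decide (x ≠ '#')) s := by
  rw [splitOn_singleton, splitSep_structure]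
  rfl

def pushLine (l : List Char) : List (List Char) :=
  let s := PySem.Chars.strip l
  if s ≠ [] ∧ PySem.Chars.startswith s ['#'] = false then
    let s2 := if PySem.Chars.isIn ['#'] s then
        PySem.Chars.strip ((PySem.Chars.splitOn s ['#']).headD []) else s
    if s2 ≠ [] then [s2] else []
  else []

theorem keyLine (l : List Char) :
    ((pushLine l).map PySem.Chars.split₀).flatten =
      PySem.Chars.split₀ (l.takeWhile (· ≠ '#')) := by
  obtain ⟨a, b, hdec, ha, hb⟩ := strip_decomp l
  by_cases hs0 : PySem.Chars.strip l = []
  · have hws := all_ws_of_strip_eq_nil hs0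
    have : List.takeWhile (fun x => decide (x ≠ '#')) l = l :=
      List.takeWhile_eq_self_iff.mpr (fun x hx => decide_eq_true (ws_ne_hash (hws x hx)))
    rw [pushLine]
    simp only [hs0, ne_eq, not_true_eq_false, false_and, if_false]
    rw [this, split₀_all_ws hws]
    rfl
  · cases hsw : PySem.Chars.startswith (PySem.Chars.strip l) ['#'] with
    | true =>
      -- strip l begins with '#'
      obtain ⟨t, ht⟩ : ∃ t, PySem.Chars.strip l = '#' :: t := by
        have h2 : ['#'] <+: PySem.Chars.strip l := by
          rw [← List.isPrefixOf_iff_prefix]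
          simpa [PySem.Chars.startswith] using hsw
        obtain ⟨t, ht⟩ := h2
        exact ⟨t, ht.symm⟩
      rw [pushLine]
      simp only [hsw, Bool.true_eq_false, and_false, if_false]
      rw [hdec, ht]
      rw [show (a ++ '#' :: t ++ b : List Char) = a ++ ('#' :: (t ++ b)) by simp]
      have : List.takeWhile (fun x => decide (x ≠ '#')) (a ++ '#' :: (t ++ b)) = a := by
        rw [List.takeWhile_append_of_pos (fun x hx => decide_eq_true (ws_ne_hash (ha x hx)))]
        rw [List.takeWhile_cons]
        simp
      rw [this, split₀_all_ws ha]
      rfl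
    | false =>
      rw [pushLine]
      simp only [hs0, hsw, ne_eq, not_false_eq_true, and_self, if_true]
      by_cases hin : PySem.Chars.isIn ['#'] (PySem.Chars.strip l) = true
      · have hmem : '#' ∈ PySem.Chars.strip l :=
          (List.singleton_infix_iff '#' _).mp ((PySem.Chars.isIn_iff_infix _ _).mp hin)
        have htw : List.takeWhile (fun x => decide (x ≠ '#')) l
            = a ++ List.takeWhile (fun x => decide (x ≠ '#')) (PySem.Chars.strip l) := by
          conv_lhs => rw [hdec]
          rw [List.append_assoc,
            List.takeWhile_append_of_pos (fun x hx => decide_eq_true (ws_ne_hash (ha x hx))),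
            takeWhile_hash_append hmem]
        simp only [hin, if_true]
        rw [htw, split₀_ws_prefix ha, headD_splitOn_hash]
        by_cases h2 : PySem.Chars.strip (List.takeWhile (fun x => decide (x ≠ '#')) (PySem.Chars.strip l)) = []
        · simp only [h2, ne_eq, not_true_eq_false, if_false]
          rw [← split₀_strip, h2]
          rfl
        · simp only [h2, ne_eq, not_false_eq_true, if_true]
          simp [split₀_strip]
      · simp only [hin, Bool.false_eq_true, if_false, hs0, not_false_eq_true, if_true]
        have hnm : '#' ∉ PySem.Chars.strip l := fun hm =>
          hin ((PySem.Chars.isIn_iff_infix _ _).mpr ((List.singleton_infix_iff '#' _).mpr hm))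
        have hnl : '#' ∉ l := by
          rw [hdec]
          intro hm
          rcases List.mem_append.mp hm with hm1 | hm1
          · rcases List.mem_append.mp hm1 with hm2 | hm2
            · exact ws_ne_hash (ha _ hm2) rfl
            · exact hnm hm2
          · exact ws_ne_hash (hb _ hm1) rfl
        have : List.takeWhile (fun x => decide (x ≠ '#')) l = l :=
          List.takeWhile_eq_self_iff.mpr (fun x hx =>
            decide_eq_true (fun he => hnl (he ▸ hx)))
        rw [this, ← split₀_strip l]
        simp

theorem aLineStep_eq (acc line) : aLineStep acc line = acc ++ aLineStep [] line := by
  simp only [aLineStep]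
  split_ifs <;> simp

theorem foldl_aLineStep (ls : List String) (acc : List String) :
    ls.foldl aLineStep acc = acc ++ ls.flatMap (aLineStep []) := by
  induction ls generalizing acc with
  | nil => simp
  | cons x xs ih =>
    rw [List.foldl_cons, ih (aLineStep acc x), aLineStep_eq acc x]
    simp

theorem split?_hash (l : String) :
    ∃ ps, PySem.Str.split? l "#" = some ps ∧
      ps.map String.toList = PySem.Chars.splitOn l.toList ['#'] := by
  have h := PySem.Str.split?_map l "#"
  rcases hs : PySem.Str.split? l "#" with _ | ps
  · rw [hs] at h
    simp [PySem.Chars.split?] at h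
  · rw [hs] at h
    refine ⟨ps, rfl, ?_⟩
    simpa [PySem.Chars.split?] using h

theorem map_toList_aLineStep (line : String) :
    (aLineStep [] line).map String.toList = pushLine line.toList := by
  rw [aLineStep, pushLine]
  have hstrip : (PySem.Str.strip line).toList = PySem.Chars.strip line.toList :=
    PySem.Str.toList_strip line
  have hne : (PySem.Str.strip line ≠ "") ↔ (PySem.Chars.strip line.toList ≠ []) := by
    rw [← hstrip, not_iff_not, ← String.toList_eq_nil_iff]
  have hsw : PySem.Str.startswith (PySem.Str.strip line) "#"
      = PySem.Chars.startswith (PySem.Chars.strip line.toList) ['#'] := by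
    rw [PySem.Str.startswith_eq, hstrip]; rfl
  have hin : PySem.Str.isIn "#" (PySem.Str.strip line)
      = PySem.Chars.isIn ['#'] (PySem.Chars.strip line.toList) := by
    rw [PySem.Str.isIn_eq, hstrip]; rfl
  obtain ⟨ps, hps, hmap⟩ := split?_hash (PySem.Str.strip line)
  have hhead : (ps.headD "").toList
      = (PySem.Chars.splitOn (PySem.Str.strip line).toList ['#']).headD [] := by
    rw [← hmap]
    cases ps <;> rfl
  by_cases h1 : PySem.Str.strip line ≠ "" ∧ PySem.Str.startswith (PySem.Str.strip line) "#" = false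
  · have h1c : PySem.Chars.strip line.toList ≠ [] ∧
        PySem.Chars.startswith (PySem.Chars.strip line.toList) ['#'] = false :=
      ⟨hne.mp h1.1, by rw [← hsw]; exact h1.2⟩
    rw [if_pos h1, if_pos h1c]
    by_cases h2 : PySem.Str.isIn "#" (PySem.Str.strip line) = true
    · have h2c : PySem.Chars.isIn ['#'] (PySem.Chars.strip line.toList) = true := by
        rw [← hin]; exact h2
      rw [if_pos h2, if_pos h2c, hps]
      have hl2 : (PySem.Str.strip (ps.headD "")).toList
          = PySem.Chars.strip ((PySem.Chars.splitOn (PySem.Chars.strip line.toList) ['#']).headD []) := by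
        rw [PySem.Str.toList_strip, hhead, hstrip]
      simp only [Option.getD_some]
      by_cases h3 : PySem.Str.strip (ps.headD "") ≠ ""
      · have h3c : PySem.Chars.strip
            ((PySem.Chars.splitOn (PySem.Chars.strip line.toList) ['#']).headD []) ≠ [] := by
          rw [← hl2]
          exact fun hnil => h3 (String.toList_inj.mp (by rw [hnil]; rfl))
        rw [if_pos h3, if_pos h3c, List.nil_append, List.map_cons, List.map_nil, hl2]
      · have h3c : ¬ PySem.Chars.strip
            ((PySem.Chars.splitOn (PySem.Chars.strip line.toList) ['#']).headD []) ≠ [] := by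
          rw [← hl2]
          simp only [not_not] at h3 ⊢
          rw [h3]; rfl
        rw [if_neg h3, if_neg h3c]
        rfl
    · have h2c : ¬ PySem.Chars.isIn ['#'] (PySem.Chars.strip line.toList) = true := by
        rw [← hin]; exact h2
      rw [if_neg h2, if_neg h2c]
      by_cases h3 : PySem.Str.strip line ≠ ""
      · have h3c : PySem.Chars.strip line.toList ≠ [] := hne.mp h3
        rw [if_pos h3, if_pos h3c, List.nil_append, List.map_cons, List.map_nil, hstrip]
      · have h3c : ¬ PySem.Chars.strip line.toList ≠ [] := fun hc => h3 (hne.mpr hc)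
        rw [if_neg h3, if_neg h3c]
        rfl
  · have h1c : ¬(PySem.Chars.strip line.toList ≠ [] ∧
        PySem.Chars.startswith (PySem.Chars.strip line.toList) ['#'] = false) := by
      rw [← hne, ← hsw]; exact h1
    rw [if_neg h1, if_neg h1c]
    rfl

theorem split?_nl (l : String) :
    ∃ ps, PySem.Str.split? l "\n" = some ps ∧
      ps.map String.toList = PySem.Chars.splitOn l.toList ['\n'] := by
  have h := PySem.Str.split?_map l "\n"
  rcases hs : PySem.Str.split? l "\n" with _ | ps
  · rw [hs] at h
    simp [PySem.Chars.split?] at h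
  · rw [hs] at h
    refine ⟨ps, rfl, ?_⟩
    simpa [PySem.Chars.split?] using h

theorem flatten_map_flatMap {α β γ : Type} (f : α → List β) (g : β → List γ) (P : List α) :
    (((P.flatMap f).map g)).flatten = P.flatMap (fun p => ((f p).map g).flatten) := by
  induction P with
  | nil => rfl
  | cons x xs ih => simp [ih]

theorem main_eq (code : String) : normalize_code_py code = normalize_code_py_alt code := by
  apply String.toList_inj.mp
  rw [normalize_code_py, normalize_code_py_alt]
  obtain ⟨P, hP, hPmap⟩ := split?_nl code
  rw [hP]
  simp only [Option.getD_some]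
  rw [foldl_aLineStep P []]
  rw [PySem.Str.toList_join, PySem.Str.toList_join,
    PySem.Str.split₀_map_toList, PySem.Str.split₀_map_toList,
    PySem.Str.toList_join, String.toList_ofList]
  rw [String.toList_ofList]
  rw [split₀_join_ws (by decide)]
  congr 1
  rw [List.nil_append]
  -- A side lines
  have hmaplines : (P.flatMap (aLineStep [])).map String.toList
      = P.flatMap (fun p => pushLine p.toList) := by
    rw [List.map_flatMap]
    exact List.flatMap_congr (fun p _ => map_toList_aLineStep p)
  rw [hmaplines, flatten_map_flatMap]
  have hA : P.flatMap (fun p => ((pushLine p.toList).map PySem.Chars.split₀).flatten)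
      = P.flatMap (fun p => PySem.Chars.split₀ (p.toList.takeWhile (· ≠ '#'))) :=
    List.flatMap_congr (fun p _ => keyLine p.toList)
  rw [hA]
  -- B side
  rw [stripHash_eq_join, split₀_join_ws (by decide)]
  rw [splitOn_singleton] at hPmap
  rw [← hPmap]
  simp [List.flatMap_def, List.map_map, Function.comp_def]
-- ===== VERDICT (by name: the statement is the Claim_ definition above) =====
theorem normalize_code_py_spec : Claim_equal_normalize_code_py := by
  intro code _
  unfold Spec_normalize_code_py
  exact main_eq code
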